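-- pv_equiv track=rewrite | github.com/glind/dashboard | src/processors/email_meeting_analyzer.py | _analyze_communication_stages
-- ===== SOURCE A (Python) =====
-- from typing import List, Dict, Any, Optional, Set, Tuple
--
-- def _analyze_communication_stages(emails: List[Dict[str, Any]]) -> Dict[str, int]:
--     """Analyze communication stages in business emails."""
--     stages = {
--         'initial_contact': 0,
--         'discovery': 0,
--         'proposal': 0,
--         'negotiation': 0,
--         'closing': 0
--     }
--
--     for email in emails:
--         content = (email.get('subject', '') + ' ' + email.get('snippet', '')).lower()
--
--         if any(term in content for term in ['introduction', 'hello', 'nice to meet']):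
--             stages['initial_contact'] += 1
--         elif any(term in content for term in ['requirements', 'needs', 'goals', 'discovery']):
--             stages['discovery'] += 1
--         elif any(term in content for term in ['proposal', 'quote', 'estimate', 'scope']):
--             stages['proposal'] += 1
--         elif any(term in content for term in ['negotiation', 'terms', 'conditions', 'pricing']):
--             stages['negotiation'] += 1
--         elif any(term in content for term in ['contract', 'agreement', 'final', 'closing']):
--             stages['closing'] += 1
--
--     return stages
-- ===== SOURCE B (Python) =====
-- _STAGE_TABLE = [
--     ('initial_contact', ['introduction', 'hello', 'nice to meet']),
--     ('discovery', ['requirements', 'needs', 'goals', 'discovery']),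
--     ('proposal', ['proposal', 'quote', 'estimate', 'scope']),
--     ('negotiation', ['negotiation', 'terms', 'conditions', 'pricing']),
--     ('closing', ['contract', 'agreement', 'final', 'closing']),
-- ]
--
--
-- def _stage_of(email):
--     content = (email.get('subject', '') + ' ' + email.get('snippet', '')).lower()
--     for name, terms in _STAGE_TABLE:
--         if any(term in content for term in terms):
--             return name
--     return None
--
--
-- def _analyze_communication_stages(emails):
--     return {name: sum(1 for e in emails if _stage_of(e) == name)
--             for name, _ in _STAGE_TABLE}
-- ===== Notes on version B (the rewrite author's own statement) =====
-- stated objective: simpler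
-- what changed: Replaces the five-way if/elif cascade mutating a counter dict in one fold with a table of (stage, keywords) pairs, a first-match classifier, and a per-stage dict comprehension that counts classified emails.
import Mathlib
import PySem

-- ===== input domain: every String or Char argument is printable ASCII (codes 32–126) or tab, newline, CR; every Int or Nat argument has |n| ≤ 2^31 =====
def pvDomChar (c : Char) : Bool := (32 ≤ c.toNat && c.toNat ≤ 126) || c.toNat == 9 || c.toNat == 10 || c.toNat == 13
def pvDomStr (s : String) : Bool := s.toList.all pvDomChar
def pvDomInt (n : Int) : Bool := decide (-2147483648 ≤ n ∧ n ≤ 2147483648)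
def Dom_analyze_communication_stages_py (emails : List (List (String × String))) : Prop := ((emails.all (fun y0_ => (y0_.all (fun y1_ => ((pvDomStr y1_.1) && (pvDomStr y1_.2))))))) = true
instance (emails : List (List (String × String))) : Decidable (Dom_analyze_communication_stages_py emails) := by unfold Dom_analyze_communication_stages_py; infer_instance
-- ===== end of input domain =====

-- B replaces A's if/elif cascade mutating a counter dict inside one fold by a (stage, keywords)
-- table, a first-match classifier, and a per-stage counting comprehension; same result, simpler.

-- ===== PORT A =====
-- literal port of A: a dict of five zeroed counters, a fold over the emails with the if/elif cascade
-- ('stages[k] += 1' is Dict.modify k 0 (·+1); every key is present from initialization, so this is exact)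
def analyze_communication_stages_py (emails : List (List (String × String))) : List (String × Int) :=
  let stages : PySem.Dict String Int :=
    PySem.Dict.ofList [("initial_contact", 0), ("discovery", 0), ("proposal", 0), ("negotiation", 0), ("closing", 0)]
  let stages := emails.foldl (fun stages email =>
    let content := PySem.Str.lower (PySem.Str.join ""
      [PySem.Dict.getD ⟨email⟩ "subject" "", " ", PySem.Dict.getD ⟨email⟩ "snippet" ""])
    if ["introduction", "hello", "nice to meet"].any (fun term => PySem.Str.isIn term content) then
      stages.modify "initial_contact" 0 (· + 1)
    else if ["requirements", "needs", "goals", "discovery"].any (fun term => PySem.Str.isIn term content) then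
      stages.modify "discovery" 0 (· + 1)
    else if ["proposal", "quote", "estimate", "scope"].any (fun term => PySem.Str.isIn term content) then
      stages.modify "proposal" 0 (· + 1)
    else if ["negotiation", "terms", "conditions", "pricing"].any (fun term => PySem.Str.isIn term content) then
      stages.modify "negotiation" 0 (· + 1)
    else if ["contract", "agreement", "final", "closing"].any (fun term => PySem.Str.isIn term content) then
      stages.modify "closing" 0 (· + 1)
    else stages) stages
  stages.items

-- ===== PORT B =====
def pvStageTable : List (String × List String) :=
  [("initial_contact", ["introduction", "hello", "nice to meet"]),
   ("discovery", ["requirements", "needs", "goals", "discovery"]),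
   ("proposal", ["proposal", "quote", "estimate", "scope"]),
   ("negotiation", ["negotiation", "terms", "conditions", "pricing"]),
   ("closing", ["contract", "agreement", "final", "closing"])]

def pvStageOf (email : List (String × String)) : Option String :=
  let content := PySem.Str.lower (PySem.Str.join ""
    [PySem.Dict.getD ⟨email⟩ "subject" "", " ", PySem.Dict.getD ⟨email⟩ "snippet" ""])
  (pvStageTable.find? (fun p => p.2.any (fun term => PySem.Str.isIn term content))).map Prod.fst

def analyze_communication_stages_py_alt (emails : List (List (String × String))) : List (String × Int) :=
  pvStageTable.map (fun p => (p.1, ((emails.countP (fun e => pvStageOf e == some p.1)) : Int)))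

-- ===== PRECONDITION & SPEC =====
def Spec_analyze_communication_stages_py (emails : List (List (String × String))) (out : List (String × Int)) : Prop := out = analyze_communication_stages_py_alt emails
instance (emails : List (List (String × String))) (out : List (String × Int)) : Decidable (Spec_analyze_communication_stages_py emails out) := by unfold Spec_analyze_communication_stages_py; infer_instance

-- ===== CLAIM (what is proved, stated in full; the proofs are below) =====
def Claim_equal_analyze_communication_stages_py : Prop := ∀ (emails : List (List (String × String))), Dom_analyze_communication_stages_py emails → Spec_analyze_communication_stages_py emails (analyze_communication_stages_py emails)

-- ===== LEMMAS AND PROOFS =====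

-- the five-counter dict A's loop maintains, with its counter values explicit
def pvMkD (a b c d e : Int) : PySem.Dict String Int :=
  PySem.Dict.ofList [("initial_contact", a), ("discovery", b), ("proposal", c), ("negotiation", d), ("closing", e)]

-- A's loop body, named for the induction
def pvStepA (stages : PySem.Dict String Int) (email : List (String × String)) : PySem.Dict String Int :=
  let content := PySem.Str.lower (PySem.Str.join ""
    [PySem.Dict.getD ⟨email⟩ "subject" "", " ", PySem.Dict.getD ⟨email⟩ "snippet" ""])
  if ["introduction", "hello", "nice to meet"].any (fun term => PySem.Str.isIn term content) then
    stages.modify "initial_contact" 0 (· + 1)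
  else if ["requirements", "needs", "goals", "discovery"].any (fun term => PySem.Str.isIn term content) then
    stages.modify "discovery" 0 (· + 1)
  else if ["proposal", "quote", "estimate", "scope"].any (fun term => PySem.Str.isIn term content) then
    stages.modify "proposal" 0 (· + 1)
  else if ["negotiation", "terms", "conditions", "pricing"].any (fun term => PySem.Str.isIn term content) then
    stages.modify "negotiation" 0 (· + 1)
  else if ["contract", "agreement", "final", "closing"].any (fun term => PySem.Str.isIn term content) then
    stages.modify "closing" 0 (· + 1)
  else stages

def pvInd (email : List (String × String)) (name : String) : Int :=
  if pvStageOf email == some name then 1 else 0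

def pvCnt (emails : List (List (String × String))) (name : String) : Int :=
  ((emails.countP (fun e => pvStageOf e == some name)) : Int)

theorem pvCnt_cons (x : List (String × String)) (xs : List (List (String × String))) (n : String) :
    pvCnt (x :: xs) n = pvInd x n + pvCnt xs n := by
  unfold pvCnt pvInd
  rw [List.countP_cons]
  by_cases h : (pvStageOf x == some n) = true <;>
    simp only [h, if_true, if_false, Bool.false_eq_true] <;> push_cast <;> ring

theorem pvModify1 (a b c d e : Int) :
    (pvMkD a b c d e).modify "initial_contact" 0 (· + 1) = pvMkD (a + 1) b c d e := rfl
theorem pvModify2 (a b c d e : Int) :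
    (pvMkD a b c d e).modify "discovery" 0 (· + 1) = pvMkD a (b + 1) c d e := rfl
theorem pvModify3 (a b c d e : Int) :
    (pvMkD a b c d e).modify "proposal" 0 (· + 1) = pvMkD a b (c + 1) d e := rfl
theorem pvModify4 (a b c d e : Int) :
    (pvMkD a b c d e).modify "negotiation" 0 (· + 1) = pvMkD a b c (d + 1) e := rfl
theorem pvModify5 (a b c d e : Int) :
    (pvMkD a b c d e).modify "closing" 0 (· + 1) = pvMkD a b c d (e + 1) := rfl

theorem pvItems (a b c d e : Int) :
    (pvMkD a b c d e).items =
      [("initial_contact", a), ("discovery", b), ("proposal", c), ("negotiation", d), ("closing", e)] := rfl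

theorem pvStep_char (x : List (String × String)) (a b c d e : Int) :
    pvStepA (pvMkD a b c d e) x =
      pvMkD (a + pvInd x "initial_contact") (b + pvInd x "discovery") (c + pvInd x "proposal")
            (d + pvInd x "negotiation") (e + pvInd x "closing") := by
  by_cases h1 : (["introduction", "hello", "nice to meet"].any (fun term => PySem.Str.isIn term
        (PySem.Str.lower (PySem.Str.join ""
          [PySem.Dict.getD ⟨x⟩ "subject" "", " ", PySem.Dict.getD ⟨x⟩ "snippet" ""])))) = true
  · have hs : pvStageOf x = some "initial_contact" := by
      simp only [pvStageOf, pvStageTable, List.find?_cons, h1, Option.map_some]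
    have i1 : pvInd x "initial_contact" = 1 := by unfold pvInd; rw [hs]; rfl
    have i2 : pvInd x "discovery" = 0 := by unfold pvInd; rw [hs]; rfl
    have i3 : pvInd x "proposal" = 0 := by unfold pvInd; rw [hs]; rfl
    have i4 : pvInd x "negotiation" = 0 := by unfold pvInd; rw [hs]; rfl
    have i5 : pvInd x "closing" = 0 := by unfold pvInd; rw [hs]; rfl
    unfold pvStepA
    rw [if_pos h1, pvModify1, i1, i2, i3, i4, i5]
    norm_num
  ·
    by_cases h2 : (["requirements", "needs", "goals", "discovery"].any (fun term => PySem.Str.isIn term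
          (PySem.Str.lower (PySem.Str.join ""
            [PySem.Dict.getD ⟨x⟩ "subject" "", " ", PySem.Dict.getD ⟨x⟩ "snippet" ""])))) = true
    · have f1 := Bool.eq_false_iff.mpr h1
      have hs : pvStageOf x = some "discovery" := by
        simp only [pvStageOf, pvStageTable, List.find?_cons, f1, h2, Option.map_some]
      have i1 : pvInd x "initial_contact" = 0 := by unfold pvInd; rw [hs]; rfl
      have i2 : pvInd x "discovery" = 1 := by unfold pvInd; rw [hs]; rfl
      have i3 : pvInd x "proposal" = 0 := by unfold pvInd; rw [hs]; rfl
      have i4 : pvInd x "negotiation" = 0 := by unfold pvInd; rw [hs]; rfl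
      have i5 : pvInd x "closing" = 0 := by unfold pvInd; rw [hs]; rfl
      unfold pvStepA
      rw [if_neg h1, if_pos h2, pvModify2, i1, i2, i3, i4, i5]
      norm_num
    ·
      by_cases h3 : (["proposal", "quote", "estimate", "scope"].any (fun term => PySem.Str.isIn term
            (PySem.Str.lower (PySem.Str.join ""
              [PySem.Dict.getD ⟨x⟩ "subject" "", " ", PySem.Dict.getD ⟨x⟩ "snippet" ""])))) = true
      · have f1 := Bool.eq_false_iff.mpr h1
        have f2 := Bool.eq_false_iff.mpr h2
        have hs : pvStageOf x = some "proposal" := by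
          simp only [pvStageOf, pvStageTable, List.find?_cons, f1, f2, h3, Option.map_some]
        have i1 : pvInd x "initial_contact" = 0 := by unfold pvInd; rw [hs]; rfl
        have i2 : pvInd x "discovery" = 0 := by unfold pvInd; rw [hs]; rfl
        have i3 : pvInd x "proposal" = 1 := by unfold pvInd; rw [hs]; rfl
        have i4 : pvInd x "negotiation" = 0 := by unfold pvInd; rw [hs]; rfl
        have i5 : pvInd x "closing" = 0 := by unfold pvInd; rw [hs]; rfl
        unfold pvStepA
        rw [if_neg h1, if_neg h2, if_pos h3, pvModify3, i1, i2, i3, i4, i5]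
        norm_num
      ·
        by_cases h4 : (["negotiation", "terms", "conditions", "pricing"].any (fun term => PySem.Str.isIn term
              (PySem.Str.lower (PySem.Str.join ""
                [PySem.Dict.getD ⟨x⟩ "subject" "", " ", PySem.Dict.getD ⟨x⟩ "snippet" ""])))) = true
        · have f1 := Bool.eq_false_iff.mpr h1
          have f2 := Bool.eq_false_iff.mpr h2
          have f3 := Bool.eq_false_iff.mpr h3
          have hs : pvStageOf x = some "negotiation" := by
            simp only [pvStageOf, pvStageTable, List.find?_cons, f1, f2, f3, h4, Option.map_some]
          have i1 : pvInd x "initial_contact" = 0 := by unfold pvInd; rw [hs]; rfl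
          have i2 : pvInd x "discovery" = 0 := by unfold pvInd; rw [hs]; rfl
          have i3 : pvInd x "proposal" = 0 := by unfold pvInd; rw [hs]; rfl
          have i4 : pvInd x "negotiation" = 1 := by unfold pvInd; rw [hs]; rfl
          have i5 : pvInd x "closing" = 0 := by unfold pvInd; rw [hs]; rfl
          unfold pvStepA
          rw [if_neg h1, if_neg h2, if_neg h3, if_pos h4, pvModify4, i1, i2, i3, i4, i5]
          norm_num
        ·
          by_cases h5 : (["contract", "agreement", "final", "closing"].any (fun term => PySem.Str.isIn term
                (PySem.Str.lower (PySem.Str.join ""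
                  [PySem.Dict.getD ⟨x⟩ "subject" "", " ", PySem.Dict.getD ⟨x⟩ "snippet" ""])))) = true
          · have f1 := Bool.eq_false_iff.mpr h1
            have f2 := Bool.eq_false_iff.mpr h2
            have f3 := Bool.eq_false_iff.mpr h3
            have f4 := Bool.eq_false_iff.mpr h4
            have hs : pvStageOf x = some "closing" := by
              simp only [pvStageOf, pvStageTable, List.find?_cons, f1, f2, f3, f4, h5, Option.map_some]
            have i1 : pvInd x "initial_contact" = 0 := by unfold pvInd; rw [hs]; rfl
            have i2 : pvInd x "discovery" = 0 := by unfold pvInd; rw [hs]; rfl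
            have i3 : pvInd x "proposal" = 0 := by unfold pvInd; rw [hs]; rfl
            have i4 : pvInd x "negotiation" = 0 := by unfold pvInd; rw [hs]; rfl
            have i5 : pvInd x "closing" = 1 := by unfold pvInd; rw [hs]; rfl
            unfold pvStepA
            rw [if_neg h1, if_neg h2, if_neg h3, if_neg h4, if_pos h5, pvModify5, i1, i2, i3, i4, i5]
            norm_num
          ·
            have f1 := Bool.eq_false_iff.mpr h1
            have f2 := Bool.eq_false_iff.mpr h2
            have f3 := Bool.eq_false_iff.mpr h3
            have f4 := Bool.eq_false_iff.mpr h4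
            have f5 := Bool.eq_false_iff.mpr h5
            have hs : pvStageOf x = none := by
              simp only [pvStageOf, pvStageTable, List.find?_cons, f1, f2, f3, f4, f5]
              rfl
            have i1 : pvInd x "initial_contact" = 0 := by unfold pvInd; rw [hs]; rfl
            have i2 : pvInd x "discovery" = 0 := by unfold pvInd; rw [hs]; rfl
            have i3 : pvInd x "proposal" = 0 := by unfold pvInd; rw [hs]; rfl
            have i4 : pvInd x "negotiation" = 0 := by unfold pvInd; rw [hs]; rfl
            have i5 : pvInd x "closing" = 0 := by unfold pvInd; rw [hs]; rfl
            unfold pvStepA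
            rw [if_neg h1, if_neg h2, if_neg h3, if_neg h4, if_neg h5, i1, i2, i3, i4, i5]
            norm_num

theorem pvFold_invariant (emails : List (List (String × String))) :
    ∀ a b c d e : Int,
      emails.foldl pvStepA (pvMkD a b c d e) =
        pvMkD (a + pvCnt emails "initial_contact") (b + pvCnt emails "discovery")
              (c + pvCnt emails "proposal") (d + pvCnt emails "negotiation")
              (e + pvCnt emails "closing") := by
  induction emails with
  | nil => intro a b c d e; simp [pvCnt]
  | cons x xs ih =>
    intro a b c d e
    rw [List.foldl_cons, pvStep_char, ih]
    simp only [pvCnt_cons]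
    ring_nf

-- ===== VERDICT (by name: the statement is the Claim_ definition above) =====
theorem analyze_communication_stages_py_spec : Claim_equal_analyze_communication_stages_py := by
  intro emails _
  unfold Spec_analyze_communication_stages_py
  show analyze_communication_stages_py emails = _
  have hA : analyze_communication_stages_py emails =
      (emails.foldl pvStepA (pvMkD 0 0 0 0 0)).items := rfl
  rw [hA, pvFold_invariant]
  simp only [zero_add]
  rw [pvItems]
  simp [analyze_communication_stages_py_alt, pvStageTable, pvCnt]
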